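-- pv_equiv track=rewrite | github.com/flynnlambrechts/bssrbot3 | app.py | checkIfGreeting
-- ===== SOURCE A (Python) =====
-- def checkIfGreeting(message): #checks if the user sends a greeting
--     possibleGreetings = ["hello", "hi", "help", "hey"]
--     message_elements = message.split()
--     for word in message_elements:
--         for el in possibleGreetings:
--             if el == word:
--                 return True
--     return False
-- ===== SOURCE B (Python) =====
-- def checkIfGreeting(message):
--     greetings = ("hello", "hi", "help", "hey")
--     word = []
--     for ch in message:
--         if ch.isspace():
--             if "".join(word) in greetings:
--                 return True
--             word = []
--         else:
--             word.append(ch)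
--     return "".join(word) in greetings
-- ===== Notes on version B (the rewrite author's own statement) =====
-- stated objective: alternative
-- what changed: Instead of splitting the message into a word list and scanning it against the greeting list word by word, B streams over the raw characters once, maintaining the current word in an accumulator and testing it at each whitespace boundary (and once at the end), never materialising the word list.
import Mathlib
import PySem

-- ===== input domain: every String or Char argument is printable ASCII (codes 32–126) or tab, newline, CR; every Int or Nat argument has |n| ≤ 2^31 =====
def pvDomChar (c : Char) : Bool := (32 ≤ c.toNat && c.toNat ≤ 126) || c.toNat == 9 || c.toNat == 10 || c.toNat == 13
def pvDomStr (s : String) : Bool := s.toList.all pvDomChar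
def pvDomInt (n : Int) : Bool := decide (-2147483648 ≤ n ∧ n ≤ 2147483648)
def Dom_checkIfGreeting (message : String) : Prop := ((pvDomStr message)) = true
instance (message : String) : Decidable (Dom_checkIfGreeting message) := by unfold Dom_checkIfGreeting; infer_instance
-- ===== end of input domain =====

-- B streams over the characters once, testing the accumulated word at each
-- whitespace boundary, instead of splitting into a word list and scanning it
-- against the greeting list (objective: alternative decomposition).

-- ===== PORT A =====
-- inner 'for el in possibleGreetings: if el == word: return True'
def pvInnerA (word : String) : List String → Bool
  | [] => false
  | el :: rest => if el == word then true else pvInnerA word rest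

-- outer 'for word in message_elements: …' with early return
def pvOuterA (possibleGreetings : List String) : List String → Bool
  | [] => false
  | word :: rest =>
      if pvInnerA word possibleGreetings then true else pvOuterA possibleGreetings rest

def checkIfGreeting (message : String) : Bool :=
  let possibleGreetings := ["hello", "hi", "help", "hey"]
  let message_elements := PySem.Str.split₀ message
  pvOuterA possibleGreetings message_elements

-- ===== PORT B =====
-- 'for ch in message: …' maintaining the current word; ch.isspace() → PySem.Chars.isspace
def pvScanB (greetings : List String) (word : List Char) : List Char → Bool
  | [] => greetings.contains (String.ofList word)
  | ch :: rest =>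
      if PySem.Chars.isspace ch then
        if greetings.contains (String.ofList word) then true
        else pvScanB greetings [] rest
      else pvScanB greetings (word ++ [ch]) rest

def checkIfGreeting_alt (message : String) : Bool :=
  pvScanB ["hello", "hi", "help", "hey"] [] message.toList

-- ===== PRECONDITION & SPEC =====
def Spec_checkIfGreeting (message : String) (out : Bool) : Prop := out = checkIfGreeting_alt message
instance (message : String) (out : Bool) : Decidable (Spec_checkIfGreeting message out) := by unfold Spec_checkIfGreeting; infer_instance

-- ===== CLAIM (what is proved, stated in full; the proofs are below) =====
def Claim_equal_checkIfGreeting : Prop := ∀ (message : String), Dom_checkIfGreeting message → Spec_checkIfGreeting message (checkIfGreeting message)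

-- ===== LEMMAS AND PROOFS =====

-- A's inner loop is membership in the greeting list
theorem pvInnerA_eq_contains (word : String) (gs : List String) :
    pvInnerA word gs = true ↔ word ∈ gs := by
  induction gs with
  | nil => simp [pvInnerA]
  | cons el rest ih =>
      simp only [pvInnerA, List.mem_cons]
      by_cases h : el = word
      · simp [h]
      · have hb : (el == word) = false := by simpa using h
        simp only [hb, Bool.false_eq_true, if_false, ih]
        constructor
        · exact Or.inr
        · rintro (hw | hw)
          · exact absurd hw.symm h
          · exact hw

theorem pvOuterA_eq_exists (gs ws : List String) :
    pvOuterA gs ws = true ↔ ∃ w ∈ ws, w ∈ gs := by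
  induction ws with
  | nil => simp [pvOuterA]
  | cons word rest ih =>
      simp only [pvOuterA]
      by_cases h : pvInnerA word gs = true
      · simp [h, (pvInnerA_eq_contains word gs).1 h]
      · have hb : pvInnerA word gs = false := by simpa using h
        have hnm : word ∉ gs := fun hw => h ((pvInnerA_eq_contains word gs).2 hw)
        simp [hb, ih, hnm]

-- split₀.go's accumulator just collects finished (reversed) words, reversed at the end
theorem split₀_go_acc (rest : List Char) :
    ∀ (cur : List Char) (acc : List (List Char)),
      PySem.Chars.split₀.go rest cur acc = acc.reverse ++ PySem.Chars.split₀.go rest cur [] := by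
  induction rest with
  | nil =>
      intro cur acc
      by_cases h : cur.isEmpty = true <;> simp [PySem.Chars.split₀.go, h]
  | cons c cs ih =>
      intro cur acc
      by_cases hs : PySem.Chars.isspace c = true
      · by_cases h : cur.isEmpty = true
        · simp only [PySem.Chars.split₀.go, hs, h, if_true]
          exact ih [] acc
        · simp only [PySem.Chars.split₀.go, hs, h, if_true]
          rw [ih [] (cur.reverse :: acc), ih [] [cur.reverse]]
          simp
      · simp only [PySem.Chars.split₀.go, hs]
        exact ih (c :: cur) acc

-- the streaming scan agrees with "some word of split₀ (with the pending word prefixed) is a greeting"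
theorem pvScanB_eq_exists (gs : List String) (hne : gs.contains "" = false) (rest : List Char) :
    ∀ (cur : List Char),
      pvScanB gs cur rest = true ↔
        ∃ w ∈ PySem.Chars.split₀.go rest cur.reverse [], gs.contains (String.ofList w) = true := by
  induction rest with
  | nil =>
      intro cur
      by_cases h : cur = []
      · subst h
        have h0 : ("" : String) ∉ gs := by simpa using hne
        simp [pvScanB, PySem.Chars.split₀.go, h0]
      · have h1 : cur.reverse.isEmpty = false := by
          simp [List.isEmpty_eq_false_iff, h]
        simp [pvScanB, PySem.Chars.split₀.go, h1]
  | cons c cs ih =>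
      intro cur
      by_cases hs : PySem.Chars.isspace c = true
      · by_cases h : cur = []
        · subst h
          have h0 : gs.contains (String.ofList []) = false := hne
          simp only [pvScanB, hs, if_true, List.reverse_nil, PySem.Chars.split₀.go,
            List.isEmpty_nil, if_true, h0, Bool.false_eq_true, if_false]
          exact ih []
        · have h1 : cur.reverse.isEmpty = false := by
            simp [List.isEmpty_eq_false_iff, h]
          simp only [pvScanB, hs, if_true, PySem.Chars.split₀.go, h1, Bool.false_eq_true,
            if_false, List.reverse_reverse]
          rw [split₀_go_acc cs [] [cur]]
          by_cases hg : gs.contains (String.ofList cur) = true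
          · simp [show String.ofList cur ∈ gs from by simpa using hg]
          · simp only [hg, Bool.false_eq_true, if_false]
            rw [ih []]
            simp only [List.reverse_nil, List.reverse_cons, List.nil_append,
              List.mem_append, List.mem_singleton]
            constructor
            · rintro ⟨w, hw, hgw⟩; exact ⟨w, Or.inr hw, hgw⟩
            · rintro ⟨w, (hw | hw), hgw⟩
              · rw [hw] at hgw; exact absurd hgw hg
              · exact ⟨w, hw, hgw⟩
      · simp only [pvScanB, hs, Bool.false_eq_true, if_false, PySem.Chars.split₀.go]
        rw [ih (cur ++ [c])]
        simp

-- ===== VERDICT (by name: the statement is the Claim_ definition above) =====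
theorem checkIfGreeting_spec : Claim_equal_checkIfGreeting := by
  intro message _
  unfold Spec_checkIfGreeting checkIfGreeting checkIfGreeting_alt
  have hne : (["hello", "hi", "help", "hey"] : List String).contains "" = false := by decide
  have hB := pvScanB_eq_exists ["hello", "hi", "help", "hey"] hne message.toList []
  have hA := pvOuterA_eq_exists ["hello", "hi", "help", "hey"] (PySem.Str.split₀ message)
  apply Bool.coe_iff_coe.mp
  rw [hA, hB]
  unfold PySem.Str.split₀ PySem.Chars.split₀
  simp only [List.reverse_nil, List.mem_map]
  constructor
  · rintro ⟨w, ⟨u, hu, rfl⟩, hg⟩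
    exact ⟨u, hu, by simpa using hg⟩
  · rintro ⟨u, hu, hg⟩
    exact ⟨String.ofList u, ⟨u, hu, rfl⟩, by simpa using hg⟩
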